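-- pv_equiv track=rewrite | github.com/isj0/Data-Structures-and-Algorithms | chapter_12/solution1.py | add_until_100
-- ===== SOURCE A (Python) =====
-- def add_until_100(array):
--     if not array:
--         return 0
--
--     sum_of_remaining_numbers = add_until_100(array[1:])
--
--     if array[0] + sum_of_remaining_numbers > 100:
--         return sum_of_remaining_numbers
--     else:
--         return array[0] + sum_of_remaining_numbers
-- ===== SOURCE B (Python) =====
-- def add_until_100(array):
--     total = 0
--     for x in reversed(array):
--         if x + total <= 100:
--             total += x
--     return total
-- ===== Notes on version B (the rewrite author's own statement) =====
-- stated objective: faster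
-- what changed: Replaces the O(n^2) recursion (each step slicing array[1:]) with a single right-to-left loop accumulating the running total, no slicing and no recursion.
import Mathlib
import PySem

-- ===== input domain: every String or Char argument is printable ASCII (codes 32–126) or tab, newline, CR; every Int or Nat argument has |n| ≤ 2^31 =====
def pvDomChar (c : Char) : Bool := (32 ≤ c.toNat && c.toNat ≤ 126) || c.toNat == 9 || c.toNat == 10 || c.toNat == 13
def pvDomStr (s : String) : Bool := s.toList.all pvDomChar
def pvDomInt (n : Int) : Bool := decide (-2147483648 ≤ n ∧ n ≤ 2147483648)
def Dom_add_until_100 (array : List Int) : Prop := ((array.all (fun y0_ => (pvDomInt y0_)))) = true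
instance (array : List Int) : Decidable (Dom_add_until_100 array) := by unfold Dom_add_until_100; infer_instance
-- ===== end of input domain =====

-- B replaces A's O(n^2) slicing recursion with a single O(n) reverse-order accumulating loop (objective: faster).


-- ===== PORT A =====
def add_until_100 (array : List Int) : Int :=
  match array with
  | [] => 0
  | x :: rest =>
    let sum_of_remaining_numbers := add_until_100 rest
    if x + sum_of_remaining_numbers > 100 then sum_of_remaining_numbers
    else x + sum_of_remaining_numbers

-- ===== PORT B =====
-- B: single reverse-order loop with an accumulator (ported as foldl over array.reverse)
def add_until_100_alt (array : List Int) : Int :=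
  array.reverse.foldl (fun total x => if x + total ≤ 100 then total + x else total) 0

-- ===== PRECONDITION & SPEC =====
def Spec_add_until_100 (array : List Int) (out : Int) : Prop := out = add_until_100_alt array
instance (array : List Int) (out : Int) : Decidable (Spec_add_until_100 array out) := by unfold Spec_add_until_100; infer_instance

-- ===== CLAIM (what is proved, stated in full; the proofs are below) =====
def Claim_equal_add_until_100 : Prop := ∀ (array : List Int), Dom_add_until_100 array → Spec_add_until_100 array (add_until_100 array)

-- ===== LEMMAS AND PROOFS =====

-- ===== VERDICT (by name: the statement is the Claim_ definition above) =====
theorem alt_eq_a (array : List Int) : add_until_100_alt array = add_until_100 array := by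
  induction array with
  | nil => rfl
  | cons x xs ih =>
    simp only [add_until_100_alt, List.reverse_cons, List.foldl_append, List.foldl_cons,
      List.foldl_nil] at *
    simp only [add_until_100, ih]
    split_ifs <;> omega

theorem add_until_100_spec : Claim_equal_add_until_100 := by
  intro array _
  unfold Spec_add_until_100
  exact (alt_eq_a array).symm
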